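-- pv_equiv track=rewrite | github.com/44arias/starks | stark_desafio_5.py | obtener_heroes_por_tipo
-- ===== SOURCE A (Python) =====
-- def normalizar_dato(dato: str, valor_default: str) -> str:
--
--     if not dato or dato.strip() == '':
--         return valor_default
--
--     return dato
--
-- def obtener_heroes_por_tipo(heroes: list, tipos: set, tipo_dato: str) -> dict:
--
--     heroes_por_tipo = {}
--
--     for tipo in tipos:
--         heroes_por_tipo[tipo] = []
--
--     for heroe in heroes:
--         valor_tipo = normalizar_dato(heroe.get(tipo_dato, ''), 'N/A')
--         for tipo in tipos:
--             if valor_tipo == tipo: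
--                 heroes_por_tipo[tipo].append(heroe['nombre'])
--
--     return heroes_por_tipo
-- ===== SOURCE B (Python) =====
-- def normalizar_dato(dato: str, valor_default: str) -> str:
--
--     if not dato or dato.strip() == '':
--         return valor_default
--
--     return dato
--
-- def obtener_heroes_por_tipo(heroes: list, tipos: set, tipo_dato: str) -> dict:
--     # One pass over heroes builds an index from normalized value to the list of
--     # whole hero records; a second pass over tipos selects and reads the names.
--     indice = {}
--     for heroe in heroes:
--         clave = normalizar_dato(heroe.get(tipo_dato, ''), 'N/A')
--         indice.setdefault(clave, []).append(heroe)
--     return {tipo: [h['nombre'] for h in indice.get(tipo, [])] for tipo in tipos}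
-- ===== Notes on version B (the rewrite author's own statement) =====
-- stated objective: faster
-- what changed: Replaced the per-hero inner scan over tipos by a single grouping pass that builds a value->heroes index once, followed by one pass over tipos that selects each group and reads the names.
import Mathlib
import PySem

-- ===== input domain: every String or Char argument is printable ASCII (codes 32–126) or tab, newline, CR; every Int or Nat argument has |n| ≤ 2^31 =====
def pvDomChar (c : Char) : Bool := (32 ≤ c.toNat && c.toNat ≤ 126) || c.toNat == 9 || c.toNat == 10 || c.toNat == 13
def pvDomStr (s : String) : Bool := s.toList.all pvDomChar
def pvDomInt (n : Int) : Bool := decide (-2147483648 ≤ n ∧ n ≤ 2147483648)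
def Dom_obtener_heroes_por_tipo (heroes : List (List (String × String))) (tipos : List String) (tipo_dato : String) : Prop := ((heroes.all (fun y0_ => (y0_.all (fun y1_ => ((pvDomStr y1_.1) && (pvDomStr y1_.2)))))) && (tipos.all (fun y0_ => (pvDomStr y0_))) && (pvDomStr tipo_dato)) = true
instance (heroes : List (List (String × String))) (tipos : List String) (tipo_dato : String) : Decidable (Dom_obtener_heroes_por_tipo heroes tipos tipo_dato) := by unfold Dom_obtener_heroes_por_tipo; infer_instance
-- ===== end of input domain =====

-- B replaces A's per-hero inner scan over tipos by a one-pass value→heroes index plus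
-- one pass over tipos (asymptotically fewer comparisons); return values proved equal on Pre_.

-- ===== PORT A =====
-- helper of the module, used by both versions ('not dato or dato.strip() == ""')
def normalizar_dato (dato : String) (valor_default : String) : String :=
  if dato == "" || PySem.Str.strip dato == "" then valor_default else dato

-- heroe['nombre'] would raise KeyError when the key is missing; Pre_ excludes those
-- inputs, the port reads the key with default "" there (never reached inside Pre_).
def obtener_heroes_por_tipo (heroes : List (List (String × String))) (tipos : List String) (tipo_dato : String) : List (String × List String) :=
  let d0 : PySem.Dict String (List String) :=
    tipos.foldl (fun d tipo => d.insert tipo []) PySem.Dict.empty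
  let d1 : PySem.Dict String (List String) :=
    heroes.foldl (fun d heroe =>
      let valor_tipo := normalizar_dato ((PySem.Dict.mk heroe).getD tipo_dato "") "N/A"
      tipos.foldl (fun d tipo =>
        if valor_tipo == tipo then
          d.modify tipo [] (fun l => l ++ [(PySem.Dict.mk heroe).getD "nombre" ""])
        else d) d) d0
  d1.items

-- ===== PORT B =====
-- indice.setdefault(clave, []).append(heroe) is exactly d[clave] = d.get(clave, []) + [heroe]
-- with the key keeping its position = PySem.Dict.modify clave [] (· ++ [heroe]).
def obtener_heroes_por_tipo_alt (heroes : List (List (String × String))) (tipos : List String) (tipo_dato : String) : List (String × List String) :=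
  let indice : PySem.Dict String (List (List (String × String))) :=
    heroes.foldl (fun d heroe =>
      let clave := normalizar_dato ((PySem.Dict.mk heroe).getD tipo_dato "") "N/A"
      d.modify clave [] (fun l => l ++ [heroe])) PySem.Dict.empty
  -- the dict comprehension over tipos
  (tipos.foldl (fun d tipo =>
      d.insert tipo ((indice.getD tipo []).map
        (fun h => (PySem.Dict.mk h).getD "nombre" ""))) PySem.Dict.empty).items

-- ===== PRECONDITION & SPEC =====
-- Pre_ excludes (a) tipos lists with duplicates (Python's tipos is a set: the List holds
-- its distinct elements) and (b) heroes whose normalized value is in tipos but that lack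
-- the key 'nombre' — there BOTH Pythons raise KeyError.
def Pre_obtener_heroes_por_tipo (heroes : List (List (String × String))) (tipos : List String) (tipo_dato : String) : Prop :=
  tipos.Nodup ∧
  ∀ heroe ∈ heroes,
    normalizar_dato ((PySem.Dict.mk heroe).getD tipo_dato "") "N/A" ∈ tipos →
    (PySem.Dict.mk heroe).contains "nombre" = true
instance (heroes : List (List (String × String))) (tipos : List String) (tipo_dato : String) : Decidable (Pre_obtener_heroes_por_tipo heroes tipos tipo_dato) := by unfold Pre_obtener_heroes_por_tipo; infer_instance

def pvWitness_obtener_heroes_por_tipo : (List (List (String × String))) × List String × String :=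
  ([[("nombre", "Ana"), ("tipo", "x")], [("nombre", "Bo")]], (["x", "N/A", "y"], "tipo"))

def Spec_obtener_heroes_por_tipo (heroes : List (List (String × String))) (tipos : List String) (tipo_dato : String) (out : List (String × List String)) : Prop := out = obtener_heroes_por_tipo_alt heroes tipos tipo_dato
instance (heroes : List (List (String × String))) (tipos : List String) (tipo_dato : String) (out : List (String × List String)) : Decidable (Spec_obtener_heroes_por_tipo heroes tipos tipo_dato out) := by unfold Spec_obtener_heroes_por_tipo; infer_instance

-- ===== CLAIM (what is proved, stated in full; the proofs are below) =====
def Claim_equal_obtener_heroes_por_tipo : Prop := ∀ (heroes : List (List (String × String))) (tipos : List String) (tipo_dato : String), Dom_obtener_heroes_por_tipo heroes tipos tipo_dato → Pre_obtener_heroes_por_tipo heroes tipos tipo_dato → Spec_obtener_heroes_por_tipo heroes tipos tipo_dato (obtener_heroes_por_tipo heroes tipos tipo_dato)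

-- ===== LEMMAS AND PROOFS =====

-- abbreviations used only by the proofs
def pvValor (tipo_dato : String) (heroe : List (String × String)) : String :=
  normalizar_dato ((PySem.Dict.mk heroe).getD tipo_dato "") "N/A"
def pvNombre (heroe : List (String × String)) : String :=
  (PySem.Dict.mk heroe).getD "nombre" ""
def pvRef (heroes : List (List (String × String))) (tipos : List String) (tipo_dato : String) : List (String × List String) :=
  tipos.map (fun t => (t, (heroes.filter (fun h => pvValor tipo_dato h == t)).map pvNombre))

-- a conditional fold that never fires
theorem pv_foldl_if_not_mem {α : Type} (l : List String) (v : String) (F : String → α → α) (d : α)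
    (hv : v ∉ l) :
    l.foldl (fun d t => if v == t then F t d else d) d = d := by
  induction l generalizing d with
  | nil => rfl
  | cons a l ih =>
    simp only [List.mem_cons, not_or] at hv
    rw [List.foldl_cons, if_neg (by simp [hv.1])]
    exact ih d hv.2

-- on a Nodup list the conditional fold fires at most once, at t = v
theorem pv_foldl_if_once {α : Type} (l : List String) (v : String) (F : String → α → α) (d : α)
    (hnd : l.Nodup) :
    l.foldl (fun d t => if v == t then F t d else d) d = if v ∈ l then F v d else d := by
  induction l generalizing d with
  | nil => simp
  | cons a l ih =>
    rcases List.nodup_cons.mp hnd with ⟨ha, hl⟩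
    by_cases hva : v = a
    · subst hva
      rw [List.foldl_cons, if_pos (beq_self_eq_true v), pv_foldl_if_not_mem l v F (F v d) ha]
      simp
    · rw [List.foldl_cons, if_neg (by simp [hva]), ih d hl]
      simp [List.mem_cons, hva]

-- modifying the assoc-dict built over tipos updates exactly the matching entry
theorem pv_items_modify (tipos : List String) (g : String → List String)
    (v nm : String) (hnd : tipos.Nodup) (hv : v ∈ tipos) :
    ((PySem.Dict.mk (tipos.map (fun t => (t, g t)))).modify v [] (fun l => l ++ [nm])).items
      = tipos.map (fun t => (t, if v == t then g t ++ [nm] else g t)) := by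
  have hkeys : (PySem.Dict.mk (tipos.map (fun t => (t, g t)))).keys = tipos := by
    simp [PySem.Dict.keys_mk, Function.comp_def]
  have hnodk : (PySem.Dict.mk (tipos.map (fun t => (t, g t)))).keys.Nodup := by
    rw [hkeys]; exact hnd
  have hcont : (PySem.Dict.mk (tipos.map (fun t => (t, g t)))).contains v = true := by
    rw [PySem.Dict.contains_eq_decide_mem_keys, hkeys]; simp [hv]
  have hmem : (v, g v) ∈ (PySem.Dict.mk (tipos.map (fun t => (t, g t)))).items := by
    exact List.mem_map_of_mem hv
  have hgetD := PySem.Dict.getD_of_mem_items _ hmem hnodk ([] : List String)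
  unfold PySem.Dict.modify
  rw [hgetD, PySem.Dict.items_insert_of_contains _ _ hcont]
  simp only [List.map_map]
  apply List.map_congr_left
  intro t _
  by_cases htv : t = v
  · subst htv; simp
  · simp [htv, Ne.symm htv]

-- one hero's inner loop, on a dict whose items are tipos.map (t, g t)
theorem pv_step (tipos : List String) (g : String → List String)
    (v nm : String) (hnd : tipos.Nodup) :
    (tipos.foldl (fun d t => if v == t then d.modify t [] (fun l => l ++ [nm]) else d)
        (PySem.Dict.mk (tipos.map (fun t => (t, g t)))))
      = PySem.Dict.mk (tipos.map (fun t => (t, if v == t then g t ++ [nm] else g t))) := by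
  refine (pv_foldl_if_once tipos v
    (fun t d => d.modify t [] (fun l => l ++ [nm]))
    (PySem.Dict.mk (tipos.map (fun t => (t, g t)))) hnd).trans ?_
  by_cases hv : v ∈ tipos
  · rw [if_pos hv]
    apply PySem.Dict.ext
    rw [pv_items_modify tipos g v nm hnd hv]
  · rw [if_neg hv]
    apply PySem.Dict.ext
    apply List.map_congr_left
    intro t ht
    have : ¬ v = t := fun h => hv (h ▸ ht)
    simp [this]

-- A's hero loop, relative to an arbitrary already-accumulated table g
theorem pv_A_loop (heroes : List (List (String × String))) (tipos : List String)
    (tipo_dato : String) (g : String → List String) (hnd : tipos.Nodup) :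
    (heroes.foldl (fun d heroe =>
        tipos.foldl (fun d tipo =>
          if normalizar_dato ((PySem.Dict.mk heroe).getD tipo_dato "") "N/A" == tipo then
            d.modify tipo [] (fun l => l ++ [(PySem.Dict.mk heroe).getD "nombre" ""])
          else d) d)
        (PySem.Dict.mk (tipos.map (fun t => (t, g t))))).items
      = tipos.map (fun t => (t, g t ++ (heroes.filter (fun h => pvValor tipo_dato h == t)).map pvNombre)) := by
  induction heroes generalizing g with
  | nil => simp
  | cons h hs ih =>
    rw [List.foldl_cons,
      pv_step tipos g (normalizar_dato ((PySem.Dict.mk h).getD tipo_dato "") "N/A")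
        ((PySem.Dict.mk h).getD "nombre" "") hnd,
      ih (fun t => if normalizar_dato ((PySem.Dict.mk h).getD tipo_dato "") "N/A" == t
            then g t ++ [(PySem.Dict.mk h).getD "nombre" ""] else g t)]
    apply List.map_congr_left
    intro t _
    by_cases hvt : pvValor tipo_dato h = t
    · simp [List.filter_cons, pvValor] at hvt ⊢
      simp [hvt, pvNombre]
    · have : ¬ (normalizar_dato ((PySem.Dict.mk h).getD tipo_dato "") "N/A" = t) := hvt
      simp [pvValor, this]

-- the initialisation loops: folding fresh inserts over Nodup tipos builds the map
theorem pv_init_items (tipos : List String) (g : String → List String) (hnd : tipos.Nodup) :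
    (tipos.foldl (fun d tipo => d.insert tipo (g tipo)) PySem.Dict.empty)
      = PySem.Dict.mk (tipos.map (fun t => (t, g t))) := by
  apply PySem.Dict.ext
  have := PySem.Dict.items_foldl_insert_fresh tipos (fun a => a) g PySem.Dict.empty
    (fun a _ => PySem.Dict.contains_empty a) (by simpa using hnd)
  simpa [PySem.Dict.items] using this

theorem pv_A_eq_ref (heroes : List (List (String × String))) (tipos : List String)
    (tipo_dato : String) (hnd : tipos.Nodup) :
    obtener_heroes_por_tipo heroes tipos tipo_dato = pvRef heroes tipos tipo_dato := by
  have h0 : (tipos.foldl (fun d tipo => d.insert tipo ([] : List String)) PySem.Dict.empty)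
      = PySem.Dict.mk (tipos.map (fun t => (t, ([] : List String)))) :=
    pv_init_items tipos (fun _ => []) hnd
  have h1 : (heroes.foldl (fun d heroe =>
        tipos.foldl (fun d tipo =>
          if normalizar_dato ((PySem.Dict.mk heroe).getD tipo_dato "") "N/A" == tipo then
            d.modify tipo [] (fun l => l ++ [(PySem.Dict.mk heroe).getD "nombre" ""])
          else d) d)
        (PySem.Dict.mk (tipos.map (fun t => (t, ([] : List String)))))).items
      = tipos.map (fun t => (t, ([] : List String) ++ (heroes.filter (fun h => pvValor tipo_dato h == t)).map pvNombre)) :=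
    pv_A_loop heroes tipos tipo_dato (fun _ => []) hnd
  simp only [obtener_heroes_por_tipo, pvRef]
  rw [h0, h1]
  simp

theorem pv_B_eq_ref (heroes : List (List (String × String))) (tipos : List String)
    (tipo_dato : String) (hnd : tipos.Nodup) :
    obtener_heroes_por_tipo_alt heroes tipos tipo_dato = pvRef heroes tipos tipo_dato := by
  have hidx : ∀ t : String,
      (heroes.foldl (fun d heroe =>
          d.modify (normalizar_dato ((PySem.Dict.mk heroe).getD tipo_dato "") "N/A") []
            (fun l => l ++ [heroe])) PySem.Dict.empty).getD t []
        = heroes.filter (fun h => pvValor tipo_dato h == t) := by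
    intro t
    have hmap : heroes.foldl (fun d heroe =>
          d.modify (normalizar_dato ((PySem.Dict.mk heroe).getD tipo_dato "") "N/A") []
            (fun l => l ++ [heroe])) PySem.Dict.empty
        = (heroes.map (fun h => (pvValor tipo_dato h, h))).foldl
            (fun d p => d.modify p.1 [] (fun l => l ++ [p.2])) PySem.Dict.empty := by
      rw [List.foldl_map]; rfl
    rw [hmap, PySem.Dict.getD_foldl_modify_append]
    simp [PySem.Dict.getD_empty, List.filter_map, Function.comp_def]
  have h2 : (tipos.foldl (fun d tipo =>
        d.insert tipo (((heroes.foldl (fun d heroe =>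
            d.modify (normalizar_dato ((PySem.Dict.mk heroe).getD tipo_dato "") "N/A") []
              (fun l => l ++ [heroe])) PySem.Dict.empty).getD tipo []).map
          (fun h => (PySem.Dict.mk h).getD "nombre" ""))) PySem.Dict.empty)
      = PySem.Dict.mk (tipos.map (fun t =>
          (t, (((heroes.foldl (fun d heroe =>
            d.modify (normalizar_dato ((PySem.Dict.mk heroe).getD tipo_dato "") "N/A") []
              (fun l => l ++ [heroe])) PySem.Dict.empty).getD t []).map
          (fun h => (PySem.Dict.mk h).getD "nombre" ""))))) :=
    pv_init_items tipos _ hnd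
  simp only [obtener_heroes_por_tipo_alt]
  rw [h2]
  apply List.map_congr_left
  intro t _
  rw [hidx t]
  rfl

-- ===== VERDICT (by name: the statement is the Claim_ definition above) =====
theorem obtener_heroes_por_tipo_spec : Claim_equal_obtener_heroes_por_tipo := by
  intro heroes tipos tipo_dato _ hpre
  unfold Spec_obtener_heroes_por_tipo
  rw [pv_A_eq_ref heroes tipos tipo_dato hpre.1, pv_B_eq_ref heroes tipos tipo_dato hpre.1]
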